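-- pv_equiv track=rewrite | github.com/XuanQuang1301/CODE_PTIT | PYTHON/PY01024 - CHẴN - LẺ.py | check
-- ===== SOURCE A (Python) =====
-- def check(n):
--     sum = 0
--     while n > 0:
--         tmp = n % 10
--         sum += tmp
--         n //= 10
--         if n > 0 and abs((n % 10) - tmp) != 2:
--             return False
--     if(sum % 10 != 0):
--         return False
--     return True
-- ===== SOURCE B (Python) =====
-- def check(n):
--     digits = []
--     while n > 0:
--         digits.append(n % 10)
--         n //= 10
--     if sum(digits) % 10 != 0:
--         return False
--     return all(abs(a - b) == 2 for a, b in zip(digits, digits[1:]))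
-- ===== Notes on version B (the rewrite author's own statement) =====
-- stated objective: idiomatic
-- what changed: B first materialises the digit list, then does two separate declarative passes (sum test, then a zip-with-successor all() for the adjacency test) instead of A's single interleaved loop with early returns and carried state.
import Mathlib
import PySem

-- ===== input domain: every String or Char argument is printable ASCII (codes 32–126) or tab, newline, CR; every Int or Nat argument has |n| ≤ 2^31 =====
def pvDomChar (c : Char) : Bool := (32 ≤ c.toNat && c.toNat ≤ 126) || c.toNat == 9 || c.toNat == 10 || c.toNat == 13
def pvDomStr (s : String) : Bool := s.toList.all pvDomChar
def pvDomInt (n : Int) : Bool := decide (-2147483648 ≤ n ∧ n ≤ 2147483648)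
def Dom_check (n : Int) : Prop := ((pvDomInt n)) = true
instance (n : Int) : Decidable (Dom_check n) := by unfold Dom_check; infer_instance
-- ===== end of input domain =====

-- B replaces A's single interleaved digit loop by a materialised digit list and two
-- separate declarative passes (sum test, zip-with-successor adjacency test); same cost.

-- ===== PORT A =====
-- A's while loop: carries the running digit sum, may return False early on an
-- adjacency violation; the final sum-divisibility test is the loop's exit code.
def checkLoop (n s : Int) : Bool :=
  if 0 < n then
    let tmp := PySem.Int.mod n 10
    let s' := s + tmp
    let n' := PySem.Int.floordiv n 10
    if 0 < n' ∧ ¬ |PySem.Int.mod n' 10 - tmp| = 2 then false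
    else checkLoop n' s'
  else decide (PySem.Int.mod s 10 = 0)
termination_by n.toNat
decreasing_by
  simp only [PySem.Int.floordiv_eq_ediv_of_pos (by omega : (0:Int) < 10)]
  omega

def check (n : Int) : Bool := checkLoop n 0

-- ===== PORT B =====
-- while n > 0: digits.append(n % 10); n //= 10
def digitsLoop (n : Int) (digits : List Int) : List Int :=
  if 0 < n then digitsLoop (PySem.Int.floordiv n 10) (digits ++ [PySem.Int.mod n 10])
  else digits
termination_by n.toNat
decreasing_by
  simp only [PySem.Int.floordiv_eq_ediv_of_pos (by omega : (0:Int) < 10)]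
  omega

def check_alt (n : Int) : Bool :=
  let digits := digitsLoop n []
  if ¬ PySem.Int.mod digits.sum 10 = 0 then false
  -- digits[1:] = digits.drop 1 (exact: the start index 1 is a nonnegative literal)
  else (digits.zip (digits.drop 1)).all (fun p => |p.1 - p.2| == 2)

-- ===== PRECONDITION & SPEC =====
def Spec_check (n : Int) (out : Bool) : Prop := out = check_alt n
instance (n : Int) (out : Bool) : Decidable (Spec_check n out) := by unfold Spec_check; infer_instance

-- ===== CLAIM (what is proved, stated in full; the proofs are below) =====
def Claim_equal_check : Prop := ∀ (n : Int), Dom_check n → Spec_check n (check n)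

-- ===== LEMMAS AND PROOFS =====

-- proof-side pure digit list (least-significant first)
def dig (n : Int) : List Int :=
  if 0 < n then PySem.Int.mod n 10 :: dig (PySem.Int.floordiv n 10) else []
termination_by n.toNat
decreasing_by
  simp only [PySem.Int.floordiv_eq_ediv_of_pos (by omega : (0:Int) < 10)]
  omega

def zipAll (ds : List Int) : Bool := (ds.zip (ds.drop 1)).all (fun p => |p.1 - p.2| == 2)

lemma digitsLoop_eq (n : Int) (acc : List Int) : digitsLoop n acc = acc ++ dig n := by
  fun_induction digitsLoop n acc with
  | case1 n acc h ih => rw [dig, if_pos h, ih, List.append_assoc]; rfl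
  | case2 n acc h => rw [dig, if_neg h, List.append_nil]

lemma zipAll_cons2 (a b : Int) (t : List Int) :
    zipAll (a :: b :: t) = ((|a - b| == 2) && zipAll (b :: t)) := by
  simp [zipAll]

lemma checkLoop_eq (n s : Int) :
    checkLoop n s =
      (if zipAll (dig n) then decide (PySem.Int.mod (s + (dig n).sum) 10 = 0) else false) := by
  fun_induction checkLoop n s with
  | case1 n s hpos tmp n' hbad =>
    rw [dig, if_pos hpos, dig, if_pos hbad.1, zipAll_cons2]
    have habs : (|PySem.Int.mod n 10 - PySem.Int.mod n' 10| == 2) = false := by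
      simp only [beq_eq_false_iff_ne, ne_eq]
      rw [abs_sub_comm]
      exact hbad.2
    rw [habs, Bool.false_and, if_neg (by simp)]
  | case2 n s hpos tmp s' n' hbad ih =>
    rw [dig, if_pos hpos, ih]
    by_cases hn' : 0 < n'
    · have habs : |PySem.Int.mod n 10 - PySem.Int.mod n' 10| = 2 := by
        rw [abs_sub_comm]
        by_contra hc
        exact hbad ⟨hn', hc⟩
      rw [dig, if_pos hn', zipAll_cons2, beq_iff_eq.mpr habs, Bool.true_and]
      have hsum : s' + (PySem.Int.mod n' 10 :: dig (PySem.Int.floordiv n' 10)).sum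
          = s + (PySem.Int.mod n 10 :: PySem.Int.mod n' 10 :: dig (PySem.Int.floordiv n' 10)).sum := by
        simp only [List.sum_cons]
        ring
      rw [hsum]
    · have hd : dig n' = [] := by rw [dig, if_neg hn']
      rw [hd]
      have hz1 : zipAll [PySem.Int.mod n 10] = true := by simp [zipAll]
      have hz0 : zipAll ([] : List Int) = true := by simp [zipAll]
      rw [hz0, hz1, if_pos rfl, if_pos rfl]
      have hsum : s' + ([] : List Int).sum = s + [PySem.Int.mod n 10].sum := by
        simp only [List.sum_cons, List.sum_nil]
        ring
      rw [hsum]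
  | case3 n s h =>
    have hd : dig n = [] := by rw [dig, if_neg h]
    rw [hd]
    have hz0 : zipAll ([] : List Int) = true := by simp [zipAll]
    rw [hz0, if_pos rfl, List.sum_nil, add_zero]

-- ===== VERDICT (by name: the statement is the Claim_ definition above) =====
theorem check_spec : Claim_equal_check := by
  intro n _
  unfold Spec_check check check_alt
  rw [checkLoop_eq, digitsLoop_eq, List.nil_append]
  show _ = (if ¬ PySem.Int.mod (dig n).sum 10 = 0 then false else zipAll (dig n))
  by_cases hz : zipAll (dig n) = true <;> by_cases hs : PySem.Int.mod (dig n).sum 10 = 0 <;>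
    simp [zipAll, Bool.and_comm]
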